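-- pv_equiv track=rewrite | github.com/pypi-data/pypi-code-1 | pywinauto/pywinauto-0.1.3.zip/pywinauto/tests/repeatedhotkey.py | GetHotkey
-- ===== SOURCE A (Python) =====
-- def GetHotkey(text):
--     "Return the position and character of the hotkey"
--
--     # find the last & character that is not followed
--     # by & or by the end of the string
--
--     curEnd = len(text) + 1
--     text = text.replace("&&", "__")
--     while True:
--         pos = text.rfind("&", 0, curEnd)
--
--         # One found was at the end of the text or
--         # no (more) & were found
--         # so return the None value
--         if pos == -1 or pos == len(text):
--             return (-1, '')
--
--         # One found but was prededed by non valid hotkey character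
--         # so continue, as that can't be a shortcut
--         if text[pos - 1] == '&':
--             curEnd = pos - 2
--             continue
--
--         # 2 ampersands in a row - so skip
--         # the 1st one and continue
--         return (pos, text[pos+1])
-- ===== SOURCE B (Python) =====
-- def GetHotkey(text):
--     "Return the position and character of the hotkey"
--     # Single forward scan: '&&' pairs are consumed, a lone '&' updates `last`.
--     n = len(text)
--     last = -1
--     i = 0
--     while i < n:
--         if text[i] == '&':
--             if i + 1 < n and text[i + 1] == '&':
--                 i += 2
--                 continue
--             last = i
--         i += 1
--     # no standalone '&', or it is the final character (no char follows it)
--     if last == -1 or last == n - 1: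
--         return (-1, '')
--     return (last, text[last + 1])
-- ===== Notes on version B (the rewrite author's own statement) =====
-- stated objective: alternative
-- what changed: Replaced A's build-a-replaced-copy (str.replace('&&','__')) plus backwards rfind-and-retry loop by a single forward scan that consumes '&&' pairs and remembers the last standalone '&', with no intermediate string.
import Mathlib
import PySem

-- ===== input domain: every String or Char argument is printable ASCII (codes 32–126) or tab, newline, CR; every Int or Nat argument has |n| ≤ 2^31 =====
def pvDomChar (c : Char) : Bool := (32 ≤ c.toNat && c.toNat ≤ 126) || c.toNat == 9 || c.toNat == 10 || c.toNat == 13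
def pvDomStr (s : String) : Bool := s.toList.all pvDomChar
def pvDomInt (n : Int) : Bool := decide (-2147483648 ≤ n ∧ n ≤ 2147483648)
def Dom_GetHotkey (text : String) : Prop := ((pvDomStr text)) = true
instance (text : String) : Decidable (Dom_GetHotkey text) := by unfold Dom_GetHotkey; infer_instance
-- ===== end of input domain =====

-- B replaces A's replace-then-backward-rfind-and-retry algorithm by a single forward scan that
-- consumes ampersand pairs and remembers the last standalone ampersand (no intermediate string).

-- ===== PORT A =====
-- the 'while True' loop of A; the fuel argument models the unbounded loop (the body provably
-- runs at most twice on any input, so fuel length+2 is never exhausted)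
def GetHotkeyLoop (r : List Char) (fuel : Nat) (curEnd : Int) : Int × String :=
  match fuel with
  | 0 => (-1, "")  -- never reached
  | fuel' + 1 =>
    -- pos = text.rfind("&", 0, curEnd)
    let pos := PySem.Chars.rfindFrom r ['&'] 0 (some curEnd)
    -- if pos == -1 or pos == len(text): return (-1, '')
    if pos = -1 ∨ pos = (r.length : Int) then (-1, "")
    -- if text[pos - 1] == '&': curEnd = pos - 2; continue
    -- (text[pos-1] never raises here: pos ≥ 0 and the list is nonempty when this line is reached)
    else if (PySem.List.pyGet? r (pos - 1)).getD ' ' = '&' then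
      GetHotkeyLoop r fuel' (pos - 2)
    -- return (pos, text[pos+1])  -- IndexError (pos+1 = len) excluded by Pre_GetHotkey
    else
      (pos, String.mk [(PySem.List.pyGet? r (pos + 1)).getD ' '])

def GetHotkey (text : String) : Int × String :=
  let cs := text.toList
  let curEnd : Int := (cs.length : Int) + 1            -- curEnd = len(text) + 1
  let r := PySem.Chars.replace cs ['&', '&'] ['_', '_'] -- text = text.replace("&&", "__")
  GetHotkeyLoop r (cs.length + 2) curEnd

-- ===== PORT B =====
-- forward scan of Source B's while-loop: '&&' advances by 2, a lone '&' records `last`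
def scanAlt : List Char → Int → Int → Int
  | [], _, last => last
  | [c], i, last => if c = '&' then i else last
  | a :: b :: t, i, last =>
      if a = '&' then
        if b = '&' then scanAlt t (i + 2) last
        else scanAlt (b :: t) (i + 1) i
      else scanAlt (b :: t) (i + 1) last

def GetHotkey_alt (text : String) : Int × String :=
  let cs := text.toList
  let n : Int := (cs.length : Int)
  let last := scanAlt cs 0 (-1)
  if last = -1 ∨ last = n - 1 then (-1, "")
  else (last, String.mk [(PySem.List.pyGet? cs (last + 1)).getD ' '])

-- ===== PRECONDITION & SPEC =====
-- Pre_ excludes exactly the inputs on which A raises IndexError at text[pos+1]: texts of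
-- length ≥ 2 whose trailing run of '&' has odd length (their last standalone '&' is the
-- final character). A returns normally everywhere else.
def Pre_GetHotkey (text : String) : Prop :=
  text.toList.length ≤ 1 ∨ (text.toList.reverse.takeWhile (fun c => c = '&')).length % 2 = 0
instance (text : String) : Decidable (Pre_GetHotkey text) := by unfold Pre_GetHotkey; infer_instance
def pvWitness_GetHotkey : String := "&File"

def Spec_GetHotkey (text : String) (out : Int × String) : Prop := out = GetHotkey_alt text
instance (text : String) (out : Int × String) : Decidable (Spec_GetHotkey text out) := by
  unfold Spec_GetHotkey; infer_instance

-- ===== CLAIM (what is proved, stated in full; the proofs are below) =====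
def Claim_equal_GetHotkey : Prop :=
  ∀ (text : String), Dom_GetHotkey text → Pre_GetHotkey text → Spec_GetHotkey text (GetHotkey text)

-- ===== LEMMAS AND PROOFS =====

-- text.replace("&&","__") as a two-at-a-time structural recursion (proof-side mirror)
def repl : List Char → List Char
  | [] => []
  | [c] => [c]
  | a :: b :: t => if a = '&' ∧ b = '&' then '_' :: '_' :: repl t else a :: repl (b :: t)

-- rfind("&", …) as a forward scan keeping the last match (proof-side mirror)
def rfindAux : List Char → Int → Int → Int
  | [], _, best => best
  | c :: t, i, best => rfindAux t (i + 1) (if c = '&' then i else best)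

def trailAmp (cs : List Char) : Nat := (cs.reverse.takeWhile (fun c => c = '&')).length

theorem length_repl (cs : List Char) : (repl cs).length = cs.length := by
  induction cs using repl.induct with
  | case1 => simp [repl]
  | case2 c => simp [repl]
  | case3 a b t h ih => simp [repl, h, ih]
  | case4 a b t h ih => simp only [repl, if_neg h]; simp [ih]

theorem replace_go_eq : ∀ (fuel : Nat) (s acc : List Char), s.length ≤ fuel →
    PySem.Chars.replace.go ['&','&'] ['_','_'] fuel s acc = acc.reverse ++ repl s := by
  intro fuel
  induction fuel with
  | zero => intro s acc h
            have : s = [] := by cases s <;> simp_all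
            subst this; simp [PySem.Chars.replace.go, repl]
  | succ n ih =>
    intro s acc h
    match s with
    | [] => simp [PySem.Chars.replace.go, repl]
    | c :: t =>
      rw [PySem.Chars.replace.go]
      by_cases hp : List.isPrefixOf ['&','&'] (c :: t) = true
      · have : ∃ t', t = '&' :: t' ∧ c = '&' := by
          cases t with
          | nil => simp [List.isPrefixOf] at hp
          | cons b t' =>
            simp [List.isPrefixOf] at hp
            exact ⟨t', by rw [← hp.2], hp.1.symm⟩
        obtain ⟨t', rfl, rfl⟩ := this
        simp only [hp, if_true]
        rw [ih]
        · simp [repl]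
        · simp at h ⊢; omega
      · simp only [hp, if_false, Bool.false_eq_true]
        rw [ih t (c :: acc) (by simp at h ⊢; omega)]
        cases t with
        | nil => simp [repl]
        | cons b t' =>
          have : ¬ (c = '&' ∧ b = '&') := by
            intro ⟨h1, h2⟩; subst h1; subst h2; simp [List.isPrefixOf] at hp
          simp [repl, this]

theorem replace_eq_repl (s : List Char) :
    PySem.Chars.replace s ['&','&'] ['_','_'] = repl s := by
  rw [PySem.Chars.replace]
  rw [if_neg (by simp)]
  rw [replace_go_eq s.length s [] (le_refl _)]
  simp

theorem prefix_amp_iff (l : List Char) (j : Nat) :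
    List.isPrefixOf ['&'] (l.drop j) = true ↔ l[j]? = some '&' := by
  rcases h : l.drop j with _ | ⟨c, t⟩
  · constructor
    · intro hp; simp [List.isPrefixOf] at hp
    · intro hg
      obtain ⟨hlt, _⟩ := List.getElem?_eq_some_iff.mp hg
      have : l.length ≤ j := by
        have := congrArg List.length h
        simp at this; omega
      omega
  · have hj : l[j]? = some c := by
      have : (l.drop j)[0]? = some c := by simp [h]
      simpa using this
    simp only [List.isPrefixOf, hj]
    constructor
    · intro hb
      have : '&' = c := by simpa using hb
      rw [← this]
    · intro hs
      have : c = '&' := by simpa using hs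
      simp [this]

theorem rfind_go_lt (l : List Char) (c : Char) :
    ∀ j, j < l.length → PySem.Chars.rfind.go (l ++ [c]) ['&'] j = PySem.Chars.rfind.go l ['&'] j := by
  intro j
  induction j with
  | zero =>
    intro hj
    rw [PySem.Chars.rfind.go, PySem.Chars.rfind.go]
    have h1 := prefix_amp_iff (l ++ [c]) 0
    have h2 := prefix_amp_iff l 0
    have hget : (l ++ [c])[0]? = l[0]? := List.getElem?_append_left hj
    by_cases hb : List.isPrefixOf ['&'] l = true
    · have hb1 : List.isPrefixOf ['&'] (l ++ [c]) = true := by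
        apply h1.mpr
        exact hget.trans (h2.mp hb)
      simp [hb, hb1]
    · have hb1 : ¬ List.isPrefixOf ['&'] (l ++ [c]) = true := by
        intro h
        exact hb (h2.mpr (hget ▸ h1.mp h))
      simp only [Bool.not_eq_true] at hb hb1
      simp [hb, hb1]
  | succ n ih =>
    intro hj
    rw [PySem.Chars.rfind.go, PySem.Chars.rfind.go]
    have h1 := prefix_amp_iff (l ++ [c]) (n+1)
    have h2 := prefix_amp_iff l (n+1)
    have hget : (l ++ [c])[n+1]? = l[n+1]? := List.getElem?_append_left hj
    by_cases hb : List.isPrefixOf ['&'] (List.drop (n+1) l) = true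
    · have hb1 : List.isPrefixOf ['&'] (List.drop (n+1) (l ++ [c])) = true :=
        h1.mpr (hget.trans (h2.mp hb))
      simp [hb, hb1]
    · have hb1 : ¬ List.isPrefixOf ['&'] (List.drop (n+1) (l ++ [c])) = true :=
        fun h => hb (h2.mpr (hget ▸ h1.mp h))
      simp only [Bool.not_eq_true] at hb hb1
      simp only [hb, hb1, if_false, Bool.false_eq_true]
      exact ih (by omega)

theorem rfind_append_singleton (l : List Char) (c : Char) :
    PySem.Chars.rfind (l ++ [c]) ['&'] =
      if c = '&' then (l.length : Int) else PySem.Chars.rfind l ['&'] := by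
  rcases l with _ | ⟨d, t⟩
  · by_cases hc : c = '&' <;>
      simp [PySem.Chars.rfind, PySem.Chars.rfind.go, List.isPrefixOf, hc] <;>
      (intro h; exact hc h.symm)
  · have hlen : ((d :: t) ++ [c]).length = (d :: t).length + 1 := by simp
    rw [PySem.Chars.rfind, hlen]
    have hstep1 : List.isPrefixOf ['&'] (List.drop ((d :: t).length + 1) ((d :: t) ++ [c])) = false := by
      rw [List.drop_eq_nil_of_le (by simp)]
      simp [List.isPrefixOf]
    rw [PySem.Chars.rfind.go]
    rw [hstep1]
    simp only [Bool.false_eq_true, if_false]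
    have hdrop : List.drop (d :: t).length ((d :: t) ++ [c]) = [c] := by
      rw [List.drop_append_of_le_length (le_refl _)]
      simp
    have hlen2 : (d :: t).length = t.length + 1 := by simp
    rw [hlen2]
    rw [PySem.Chars.rfind.go]
    rw [← hlen2, hdrop]
    by_cases hc : c = '&'
    · simp [List.isPrefixOf, hc, hlen2]
    · have hpf : List.isPrefixOf ['&'] [c] = false := by
        simp [List.isPrefixOf]
        intro h; exact hc h.symm
      rw [hpf]
      simp only [Bool.false_eq_true, if_false, hc]
      rw [PySem.Chars.rfind]
      rw [show (d :: t).length = t.length + 1 from by simp]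
      rw [PySem.Chars.rfind.go]
      have : List.isPrefixOf ['&'] (List.drop (t.length + 1) (d :: t)) = false := by
        rw [List.drop_eq_nil_of_le (by simp)]
        simp [List.isPrefixOf]
      rw [this]
      simp only [Bool.false_eq_true, if_false]
      exact rfind_go_lt (d :: t) c t.length (by simp)

theorem rfindAux_append_singleton (l : List Char) (c : Char) :
    ∀ i b, rfindAux (l ++ [c]) i b = if c = '&' then i + l.length else rfindAux l i b := by
  induction l with
  | nil => intro i b; simp [rfindAux]
  | cons d t ih =>
    intro i b
    simp only [List.cons_append, rfindAux, ih]
    by_cases hc : c = '&'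
    · simp only [hc, if_true, List.length_cons]
      omega
    · simp [hc]

theorem rfind_eq_rfindAux (l : List Char) : PySem.Chars.rfind l ['&'] = rfindAux l 0 (-1) := by
  induction l using List.reverseRecOn with
  | nil => simp [PySem.Chars.rfind, PySem.Chars.rfind.go, rfindAux, List.isPrefixOf]
  | append_singleton t c ih =>
    rw [rfind_append_singleton, rfindAux_append_singleton]
    split
    · simp
    · exact ih

theorem rfindFrom_topcall (s : List Char) :
    PySem.Chars.rfindFrom s ['&'] 0 (some ((s.length : Int) + 1)) = PySem.Chars.rfind s ['&'] := by
  rw [PySem.Chars.rfindFrom]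
  simp only [show ((s.length : Int)) < (s.length : Int) + 1 from by omega, if_pos]
  simp only [show ¬ ((0:Int) < 0) from by omega, ite_false]
  rw [if_neg (show ¬ ((s.length:Int) < 0) from by omega)]
  simp only [Int.toNat_zero, List.drop_zero, Int.toNat_natCast, List.take_length]
  split
  · omega
  · omega

-- the backward rfind over the replaced text computes exactly what B's forward scan computes
theorem rfindAux_repl_eq_scanAlt (cs : List Char) :
    ∀ i b, rfindAux (repl cs) i b = scanAlt cs i b := by
  induction cs using repl.induct with
  | case1 => intro i b; simp [repl, scanAlt, rfindAux]
  | case2 c => intro i b; by_cases hc : c = '&' <;> simp [repl, scanAlt, rfindAux, hc]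
  | case3 a b t h ih =>
    intro i bb
    obtain ⟨rfl, rfl⟩ := h
    simp [repl, rfindAux, scanAlt, ih, show i + 1 + 1 = i + 2 from by ring]
  | case4 a b t h ih =>
    intro i bb
    simp only [repl, if_neg h]
    by_cases ha : a = '&'
    · have hb : ¬ b = '&' := fun hb => h ⟨ha, hb⟩
      simp only [rfindAux, scanAlt, if_neg hb, ih, ha]
      simp
    · simp [rfindAux, scanAlt, if_neg ha, ih]

theorem rfindAux_eq_or_ge (l : List Char) : ∀ i b, rfindAux l i b = b ∨ i ≤ rfindAux l i b := by
  induction l with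
  | nil => intro i b; left; rfl
  | cons c t ih =>
    intro i b
    by_cases hc : c = '&'
    · simp only [rfindAux, if_pos hc]
      rcases ih (i+1) i with h | h
      · right; omega
      · right; omega
    · simp only [rfindAux, if_neg hc]
      rcases ih (i+1) b with h | h
      · left; exact h
      · right; omega

theorem rfindAux_ge_amp (l : List Char) :
    ∀ i b (j : Nat), j < l.length → l[j]? = some '&' → i + j ≤ rfindAux l i b := by
  induction l with
  | nil => intro i b j hj _; simp at hj
  | cons c t ih =>
    intro i b j hj hget
    match j with
    | 0 =>
      have hc : c = '&' := by simpa using hget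
      simp only [rfindAux, if_pos hc]
      rcases rfindAux_eq_or_ge t (i+1) i with h | h <;> omega
    | j'+1 =>
      have hget' : t[j']? = some '&' := by simpa using hget
      have := ih (i+1) (if c = '&' then i else b) j' (by simp at hj; omega) hget'
      simp only [rfindAux]
      omega

theorem rfindAux_spec (l : List Char) :
    ∀ i b, rfindAux l i b = b ∨
      ∃ j : Nat, j < l.length ∧ rfindAux l i b = i + j ∧ l[j]? = some '&' := by
  induction l with
  | nil => intro i b; left; rfl
  | cons c t ih =>
    intro i b
    by_cases hc : c = '&'
    · simp only [rfindAux, if_pos hc]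
      rcases ih (i+1) i with h | ⟨j, hj, he, hg⟩
      · right; exact ⟨0, by simp, by simpa [hc] using h, by simp [hc]⟩
      · right; exact ⟨j+1, by simp; omega, by rw [he]; omega, by simpa using hg⟩
    · simp only [rfindAux, if_neg hc]
      rcases ih (i+1) b with h | ⟨j, hj, he, hg⟩
      · left; exact h
      · right; exact ⟨j+1, by simp; omega, by rw [he]; omega, by simpa using hg⟩

-- replace only turns '&' into '_', position by position
theorem repl_get (cs : List Char) :
    ∀ j : Nat, (repl cs)[j]? = cs[j]? ∨ ((repl cs)[j]? = some '_' ∧ cs[j]? = some '&') := by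
  induction cs using repl.induct with
  | case1 => intro j; left; simp [repl]
  | case2 c => intro j; left; simp [repl]
  | case3 a b t h ih =>
    obtain ⟨rfl, rfl⟩ := h
    intro j
    simp only [repl, and_self, ite_true]
    match j with
    | 0 => right; simp
    | 1 => right; simp
    | j'+2 =>
      rcases ih j' with h | h
      · left; simpa using h
      · right; simpa using h
  | case4 a b t h ih =>
    intro j
    simp only [repl, if_neg h]
    match j with
    | 0 => left; simp
    | j'+1 =>
      rcases ih j' with h' | h'
      · left; simpa using h'
      · right; simpa using h'

-- a surviving '&' is never followed by another '&' in the source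
theorem repl_amp_next (cs : List Char) :
    ∀ j : Nat, (repl cs)[j]? = some '&' → cs[j+1]? ≠ some '&' := by
  induction cs using repl.induct with
  | case1 => intro j h; simp [repl] at h
  | case2 c => intro j h
               match j with
               | 0 => simp
               | j'+1 => simp [repl] at h
  | case3 a b t h ih =>
    obtain ⟨rfl, rfl⟩ := h
    intro j hg
    simp only [repl, and_self, ite_true] at hg
    match j with
    | 0 => simp at hg
    | 1 => simp at hg
    | j'+2 =>
      have := ih j' (by simpa using hg)
      simpa using this
  | case4 a b t h ih =>
    intro j hg
    simp only [repl, if_neg h] at hg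
    match j with
    | 0 =>
      have ha : a = '&' := by simpa using hg
      have hb : ¬ b = '&' := fun hb => h ⟨ha, hb⟩
      simpa using hb
    | j'+1 =>
      have := ih j' (by simpa using hg)
      simpa using this

theorem getLast?_cons_ne_nil {c : Char} {l : List Char} (h : l ≠ []) :
    List.getLast? (c :: l) = List.getLast? l := by
  cases l with
  | nil => exact absurd rfl h
  | cons d t => simp [List.getLast?_cons]

theorem repl_ne_nil {cs : List Char} (h : cs ≠ []) : repl cs ≠ [] := by
  intro hn
  have := length_repl cs
  rw [hn] at this
  exact h (List.eq_nil_of_length_eq_zero this.symm)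

theorem takeWhile_all {p : Char → Bool} {l : List Char}
    (h : (List.takeWhile p l).length = l.length) : List.takeWhile p l = l :=
  (List.takeWhile_sublist p).eq_of_length h

-- the replaced text ends in '&' only when the source's trailing '&'-run is odd
theorem repl_last_amp (cs : List Char) :
    (repl cs).getLast? = some '&' → trailAmp cs % 2 = 1 := by
  induction cs using repl.induct with
  | case1 => intro h; simp [repl] at h
  | case2 c =>
    intro h
    simp [repl, List.getLast?_cons] at h
    simp [trailAmp, List.takeWhile, h]
  | case3 a b t h ih =>
    obtain ⟨rfl, rfl⟩ := h
    intro hg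
    have htrail : trailAmp ('&' :: '&' :: t) % 2 = trailAmp t % 2 := by
      have hrev : ('&' :: '&' :: t).reverse = t.reverse ++ ['&', '&'] := by simp
      rw [trailAmp, hrev, List.takeWhile_append]
      split
      · rename_i heq
        simp only [List.length_append, List.length_reverse] at heq ⊢
        have h2 : (List.takeWhile (fun c => c = '&') ['&', '&']).length = 2 := rfl
        rw [h2]
        rw [trailAmp, heq]
        omega
      · rfl
    rcases Decidable.em (t = []) with rfl | hne
    · simp [repl, List.getLast?_cons] at hg
    · have hrt := repl_ne_nil hne
      rw [repl] at hg
      simp only [and_self, ite_true] at hg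
      rw [getLast?_cons_ne_nil (by simp [hrt]), getLast?_cons_ne_nil hrt] at hg
      rw [htrail]
      exact ih hg
  | case4 a b t h ih =>
    intro hg
    have hrt : repl (b :: t) ≠ [] := repl_ne_nil (by simp)
    rw [repl, if_neg h, getLast?_cons_ne_nil hrt] at hg
    have hodd := ih hg
    have htrail : trailAmp (a :: b :: t) = trailAmp (b :: t) := by
      have hrev : (a :: b :: t).reverse = (b :: t).reverse ++ [a] := by simp
      rw [trailAmp, hrev, List.takeWhile_append]
      split
      · rename_i heq
        have hall := takeWhile_all heq
        have hb : b = '&' := by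
          have hmem : b ∈ (b :: t).reverse := by simp
          have := List.takeWhile_eq_self_iff.mp hall b hmem
          simpa using this
        have ha : ¬ a = '&' := fun ha => h ⟨ha, hb⟩
        have hta : List.takeWhile (fun c => c = '&') [a] = [] := by
          simp [List.takeWhile, ha]
        rw [hta, trailAmp, hall]
        simp
      · rfl
    rw [htrail]
    exact hodd

theorem core_eq (cs : List Char)
    (hpre : cs.length ≤ 1 ∨ trailAmp cs % 2 = 0) :
    GetHotkeyLoop (PySem.Chars.replace cs ['&','&'] ['_','_']) (cs.length + 2) ((cs.length : Int) + 1)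
      = (if scanAlt cs 0 (-1) = -1 ∨ scanAlt cs 0 (-1) = (cs.length : Int) - 1 then ((-1 : Int), "")
         else (scanAlt cs 0 (-1),
               String.mk [(PySem.List.pyGet? cs (scanAlt cs 0 (-1) + 1)).getD ' '])) := by
  rw [replace_eq_repl]
  have hlen := length_repl cs
  have hpos : PySem.Chars.rfindFrom (repl cs) ['&'] 0 (some ((cs.length : Int) + 1))
      = scanAlt cs 0 (-1) := by
    rw [show ((cs.length : Int) + 1) = ((repl cs).length : Int) + 1 from by rw [hlen]]
    rw [rfindFrom_topcall, rfind_eq_rfindAux, rfindAux_repl_eq_scanAlt]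
  have hspec := rfindAux_spec (repl cs) 0 (-1)
  rw [rfindAux_repl_eq_scanAlt] at hspec
  rw [show cs.length + 2 = (cs.length + 1) + 1 from rfl]
  rw [GetHotkeyLoop]
  simp only [hpos]
  rcases hspec with hneg | ⟨j, hjlen, hpj, hgj⟩
  · rw [hneg]
    simp
  · rw [hlen] at hjlen
    have hpj' : scanAlt cs 0 (-1) = (j : Int) := by omega
    by_cases hend : j = cs.length - 1
    · -- the found '&' is the last character
      rcases Nat.lt_or_ge cs.length 2 with hsmall | hbig
      · -- cs = ['&']
        have hj0 : j = 0 := by omega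
        subst hj0
        have hlen1 : cs.length = 1 := by omega
        rcases cs with _ | ⟨c, _ | ⟨d, t⟩⟩ <;> simp at hlen1
        have hc : c = '&' := by
          have : (repl [c])[0]? = some c := by simp [repl]
          rw [this] at hgj
          simpa using hgj
        subst hc
        decide
      · -- length ≥ 2: the trailing '&'-run would be odd, excluded by hpre
        exfalso
        have hgl : (repl cs).getLast? = some '&' := by
          rw [List.getLast?_eq_getElem?, hlen, ← hend]
          exact hgj
        have := repl_last_amp cs hgl
        omega
    · -- general case: A returns on the first pass
      have hj1 : j + 1 < cs.length := by omega
      rw [hpj']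
      rw [if_neg (show ¬((j:Int) = -1 ∨ (j:Int) = ((repl cs).length : Int)) from by rw [hlen]; exact not_or.mpr ⟨by omega, by omega⟩)]
      -- text[pos-1] is not '&', so A returns on this pass
      have hnot : ∃ d, PySem.List.pyGet? (repl cs) ((j : Int) - 1) = some d ∧ d ≠ '&' := by
        rcases Nat.eq_zero_or_pos j with rfl | hj1'
        · -- pos = 0: text[-1] is the last character of the replaced text
          have hm1 : ((0 : Nat) : Int) - 1 = -1 := by omega
          rw [hm1, PySem.List.pyGet?_neg_one, List.getLast?_eq_getElem?, hlen]
          have hlt : cs.length - 1 < (repl cs).length := by omega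
          obtain ⟨d, hd⟩ : ∃ d, (repl cs)[cs.length - 1]? = some d :=
            ⟨_, List.getElem?_eq_getElem hlt⟩
          refine ⟨d, hd, ?_⟩
          intro rfl
          have := rfindAux_ge_amp (repl cs) 0 (-1) (cs.length - 1) hlt hd
          rw [rfindAux_repl_eq_scanAlt, hpj'] at this
          omega
        · have h0 : (0 : Int) ≤ (j : Int) - 1 := by omega
          rw [PySem.List.pyGet?_of_nonneg _ h0]
          have htn : ((j : Int) - 1).toNat = j - 1 := by omega
          rw [htn]
          have hlt : j - 1 < (repl cs).length := by omega
          obtain ⟨d, hd⟩ : ∃ d, (repl cs)[j-1]? = some d := ⟨_, List.getElem?_eq_getElem hlt⟩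
          refine ⟨d, hd, ?_⟩
          intro rfl
          have hnext := repl_amp_next cs (j-1) hd
          rw [show j - 1 + 1 = j from by omega] at hnext
          rcases repl_get cs j with hsame | ⟨_, hsrc⟩
          · exact hnext (hsame ▸ hgj)
          · exact hnext hsrc
      obtain ⟨d, hd, hdne⟩ := hnot
      rw [hd]
      simp only [Option.getD_some]
      rw [if_neg hdne]
      rw [if_neg (not_or.mpr ⟨by omega, by omega⟩)]
      -- the character after the hotkey survives the replacement unchanged
      have hcast : ((j : Int) + 1) = ((j + 1 : Nat) : Int) := by push_cast; ring
      rw [hcast, PySem.List.pyGet?_natCast, PySem.List.pyGet?_natCast]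
      have hch : (repl cs)[j+1]? = cs[j+1]? := by
        rcases repl_get cs (j+1) with hsame | ⟨_, hsrc⟩
        · exact hsame
        · exact absurd hsrc (repl_amp_next cs j hgj)
      rw [hch]

-- ===== VERDICT (by name: the statement is the Claim_ definition above) =====
theorem GetHotkey_spec : Claim_equal_GetHotkey := by
  unfold Claim_equal_GetHotkey
  intro text _ hpre
  unfold Spec_GetHotkey
  exact core_eq text.toList hpre
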